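-- pv_equiv track=rewrite | github.com/StephanBischoff-Digle/adventofcode | 2022/15/Python/proto2.py | find_missing
-- ===== SOURCE A (Python) =====
-- from typing import Optional
--
-- def find_missing(intervals: list[list[int, int]], hi=20) -> Optional[int]:
--     # filter intervals that are out of bounds or clmap them to the bounds
--     intervals = list(
--         map(lambda x: [max(0, x[0]), min(hi, x[1])],
--             filter(lambda x: x[0] <= hi and x[1] >= 0, intervals)))
--
--     # start with the lowest min
--     intervals.sort()
--
--     stack = []
--     stack.append(intervals[0])
--     for i in intervals[1:]:
--         # check if the intervals are overlapping or adjecent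
--         if stack[-1][0]-1 <= i[0] and i[0] <= stack[-1][1]+1:
--             # update the max val of the biggest intervall
--             stack[-1][1] = max(stack[-1][1], i[1])
--         else:
--             # add a new disjunkt interval
--             stack.append(i)
--
--     # check if more than one interval was found
--     # if so, take the smallest one's max and return the succesor
--     if len(stack) > 1:
--         return stack[0][1]+1
--
--     # all intervals overlapping, report None missing
--     return None
-- ===== SOURCE B (Python) =====
-- def find_missing(intervals, hi=20):
--     # clamp the in-bounds intervals (no sorting anywhere)
--     spans = [[max(0, x[0]), min(hi, x[1])] for x in intervals
--              if x[0] <= hi and x[1] >= 0]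
--     # the block is grown from the lexicographically smallest span
--     seed = min(spans)          # raises on empty input, like A's intervals[0]
--     spans.remove(seed)
--     reach = seed[1]
--     # saturate: repeatedly absorb any span that touches/overlaps the block,
--     # in arbitrary order, until a fixed point is reached
--     changed = True
--     while changed:
--         changed = False
--         for lo, hb in spans:
--             if lo <= reach + 1 and hb > reach:
--                 reach = hb
--                 changed = True
--     # a span beyond the saturated reach means reach+1 is missing
--     if any(lo > reach + 1 for lo, hb in spans):
--         return reach + 1
--     return None
-- ===== Notes on version B (the rewrite author's own statement) =====
-- stated objective: alternative
-- what changed: B never sorts: it seeds a block from the minimum span and grows it by fixed-point saturation (repeated absorption passes in arbitrary order) until no span touches the block, instead of A's sort followed by a sequential stack merge.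
import Mathlib
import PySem

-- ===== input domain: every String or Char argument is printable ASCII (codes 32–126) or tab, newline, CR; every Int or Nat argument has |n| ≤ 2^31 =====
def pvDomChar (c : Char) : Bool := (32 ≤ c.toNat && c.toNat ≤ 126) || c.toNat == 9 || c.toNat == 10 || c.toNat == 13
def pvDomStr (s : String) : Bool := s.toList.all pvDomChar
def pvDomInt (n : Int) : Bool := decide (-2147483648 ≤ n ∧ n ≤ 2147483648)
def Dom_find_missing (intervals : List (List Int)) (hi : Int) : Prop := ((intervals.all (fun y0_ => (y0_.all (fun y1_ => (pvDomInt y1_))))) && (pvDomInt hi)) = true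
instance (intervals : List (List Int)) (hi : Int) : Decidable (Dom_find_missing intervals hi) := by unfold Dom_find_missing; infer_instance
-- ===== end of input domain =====

-- B drops A's sort + stack merge entirely: it grows the block of the minimum span by
-- fixed-point saturation passes over the unsorted spans (objective: alternative).

-- ===== PORT A =====
-- loop body: stack[-1] read via getLast?; the in-place `stack[-1][1] = max(...)` becomes
-- replacing the last element by `last.set 1 (max ...)` (exact: .set updates index 1 in place).
def pvStepA (stack : List (List Int)) (i : List Int) : List (List Int) :=
  match stack.getLast? with
  | none => stack ++ [i]  -- unreachable: the stack is seeded nonempty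
  | some last =>
    if last.getD 0 0 - 1 ≤ i.getD 0 0 ∧ i.getD 0 0 ≤ last.getD 1 0 + 1 then
      stack.dropLast ++ [last.set 1 (max (last.getD 1 0) (i.getD 1 0))]
    else
      stack ++ [i]

def find_missing (intervals : List (List Int)) (hi : Int) : Option Int :=
  let ivs := PySem.List.sorted2
      ((intervals.filter (fun x => decide (x.getD 0 0 ≤ hi) && decide (0 ≤ x.getD 1 0))).map
        (fun x => [max 0 (x.getD 0 0), min hi (x.getD 1 0)]))
      (fun x => x.getD 0 0) (fun x => x.getD 1 0)
  match ivs with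
  | [] => none  -- Python raises IndexError at intervals[0] here; Pre_ excludes this
  | first :: rest =>
    let stack := rest.foldl pvStepA [first]
    if stack.length > 1 then some ((stack.headD []).getD 1 0 + 1) else none

-- ===== PORT B =====
-- Python's `x < m` on the 2-element spans is lexicographic on (x[0], x[1]); exact here
-- because every span Source B builds is a 2-element list.
def pvListLt2 (x y : List Int) : Bool :=
  decide (x.getD 0 0 < y.getD 0 0) ||
    (decide (x.getD 0 0 = y.getD 0 0) && decide (x.getD 1 0 < y.getD 1 0))

-- min(spans): first minimal element; none exactly where Python's min raises ValueError
def pvMinSpan : List (List Int) → Option (List Int)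
  | [] => none
  | s :: rest => some (rest.foldl (fun m x => if pvListLt2 x m then x else m) s)

-- one `for lo, hb in spans` body of Source B's saturation pass (unpacking is exact: 2-lists)
def pvPassStep (st : Int × Bool) (x : List Int) : Int × Bool :=
  if x.getD 0 0 ≤ st.1 + 1 ∧ st.1 < x.getD 1 0 then (x.getD 1 0, true) else st

-- Source B's `while changed:` loop; the fuel `spans.length + 1` is exact: every pass that
-- sets `changed` strictly shrinks the set of spans reaching beyond `reach` (see the
-- saturation lemmas below the claim block)
def pvSat (spans : List (List Int)) : Nat → Int → Int
  | 0, r => r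
  | fuel + 1, r =>
    let st := spans.foldl pvPassStep (r, false)
    if st.2 then pvSat spans fuel st.1 else r

def find_missing_alt (intervals : List (List Int)) (hi : Int) : Option Int :=
  let spans := (intervals.filter (fun x => decide (x.getD 0 0 ≤ hi) && decide (0 ≤ x.getD 1 0))).map
      (fun x => [max 0 (x.getD 0 0), min hi (x.getD 1 0)])
  match pvMinSpan spans with
  | none => none  -- Source B's min(spans) raises ValueError here; Pre_ excludes this
  | some seed =>
    match PySem.List.remove? spans seed with
    | none => none  -- unreachable: the minimum is a member
    | some rest =>
      let r := pvSat rest (rest.length + 1) (seed.getD 1 0)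
      if rest.any (fun x => decide (r + 1 < x.getD 0 0)) then some (r + 1) else none

-- ===== PRECONDITION & SPEC =====
-- Pre_ is exactly where the Python A returns: every interval must have an index 0 (len ≥ 1),
-- an index 1 whenever x[0] <= hi lets the `and` reach x[1] (len ≥ 2 there), and at least one
-- interval must survive the filter (else intervals[0] raises IndexError).
def Pre_find_missing (intervals : List (List Int)) (hi : Int) : Prop :=
  (∀ x ∈ intervals, 1 ≤ x.length ∧ (x.getD 0 0 ≤ hi → 2 ≤ x.length)) ∧
  (∃ x ∈ intervals, x.getD 0 0 ≤ hi ∧ 0 ≤ x.getD 1 0)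
instance (intervals : List (List Int)) (hi : Int) : Decidable (Pre_find_missing intervals hi) := by
  unfold Pre_find_missing; infer_instance

def pvWitness_find_missing : List (List Int) × Int := ([[0, 2], [5, 6]], 10)

def Spec_find_missing (intervals : List (List Int)) (hi : Int) (out : Option Int) : Prop :=
  out = find_missing_alt intervals hi
instance (intervals : List (List Int)) (hi : Int) (out : Option Int) : Decidable (Spec_find_missing intervals hi out) := by
  unfold Spec_find_missing; infer_instance

-- ===== CLAIM (what is proved, stated in full; the proofs are below) =====
def Claim_equal_find_missing : Prop := ∀ (intervals : List (List Int)) (hi : Int), Dom_find_missing intervals hi → Pre_find_missing intervals hi → Spec_find_missing intervals hi (find_missing intervals hi)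

-- ===== LEMMAS AND PROOFS =====

-- abbreviations for the two fields of a span
def pvLo (x : List Int) : Int := x.getD 0 0
def pvHb (x : List Int) : Int := x.getD 1 0

-- `reach` is a fixed point of the saturation over l
def pvFix (l : List (List Int)) (r : Int) : Prop := ∀ x ∈ l, pvLo x ≤ r + 1 → pvHb x ≤ r

-- the least fixed point above the seed b
def pvFixMin (l : List (List Int)) (b r : Int) : Prop :=
  b ≤ r ∧ pvFix l r ∧ ∀ r0, b ≤ r0 → pvFix l r0 → r ≤ r0

-- lexicographic "≤" on spans, the order Python's list comparison induces on 2-lists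
def pvRle (a b : List Int) : Prop := pvLo a < pvLo b ∨ (pvLo a = pvLo b ∧ pvHb a ≤ pvHb b)

lemma pvRle_trans {a b c : List Int} (h1 : pvRle a b) (h2 : pvRle b c) : pvRle a c := by
  unfold pvRle at *; omega

-- a bridge between the sort's boolean comparison and pvRle
lemma pvRle_of_bool {a b : List Int}
    (h : (decide (pvLo a < pvLo b) || (!decide (pvLo b < pvLo a) && decide (pvHb a < pvHb b))) = true) :
    pvRle a b := by
  unfold pvRle
  by_cases h1 : pvLo a < pvLo b
  · exact Or.inl h1
  · rw [decide_eq_false h1] at h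
    simp only [Bool.false_or, Bool.and_eq_true, Bool.not_eq_true', decide_eq_false_iff_not,
      decide_eq_true_iff] at h
    obtain ⟨h2, h3⟩ := h
    exact Or.inr ⟨by omega, by omega⟩

lemma pvRle_of_bool_false {a b : List Int}
    (h : (decide (pvLo a < pvLo b) || (!decide (pvLo b < pvLo a) && decide (pvHb a < pvHb b))) = false) :
    pvRle b a := by
  unfold pvRle
  obtain ⟨hx, hy⟩ := Bool.or_eq_false_iff.mp h
  rw [decide_eq_false_iff_not] at hx
  by_cases h1 : pvLo b < pvLo a
  · exact Or.inl h1
  · rw [decide_eq_false h1] at hy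
    simp only [Bool.not_false, Bool.true_and, decide_eq_false_iff_not] at hy
    exact Or.inr ⟨by omega, by omega⟩

-- the two outcomes of Source B's `x < m` comparison, in terms of pvRle
lemma pvLt2_true {x y : List Int} (h : pvListLt2 x y = true) : pvRle x y := by
  unfold pvListLt2 at h
  simp only [Bool.or_eq_true, Bool.and_eq_true, decide_eq_true_iff] at h
  unfold pvRle pvLo pvHb
  omega

lemma pvLt2_false {x y : List Int} (h : pvListLt2 x y = false) : pvRle y x := by
  unfold pvListLt2 at h
  simp only [Bool.or_eq_false_iff, Bool.and_eq_false_iff, decide_eq_false_iff_not] at h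
  unfold pvRle pvLo pvHb
  omega

-- sorted2 is pairwise lex-nondecreasing (insert step)
lemma pvInsertBy2_pairwise (x : List Int) (ys : List (List Int))
    (h : ys.Pairwise pvRle) :
    (PySem.List.insertBy
        (fun a b => decide (pvLo a < pvLo b) || (!decide (pvLo b < pvLo a) && decide (pvHb a < pvHb b)))
        x ys).Pairwise pvRle := by
  induction ys with
  | nil => simp [PySem.List.insertBy]
  | cons y ys ih =>
    rw [List.pairwise_cons] at h
    simp only [PySem.List.insertBy]
    split
    · rename_i hb
      have hxy : pvRle x y := pvRle_of_bool hb
      refine List.pairwise_cons.mpr ⟨?_, List.pairwise_cons.mpr h⟩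
      intro z hz
      rcases List.mem_cons.mp hz with rfl | hz
      · exact hxy
      · exact pvRle_trans hxy (h.1 z hz)
    · rename_i hb
      have hyx : pvRle y x := pvRle_of_bool_false (by simpa using hb)
      refine List.pairwise_cons.mpr ⟨?_, ih h.2⟩
      intro z hz
      rcases (PySem.List.mem_insertBy _ _ _ _).mp hz with rfl | hz
      · exact hyx
      · exact h.1 z hz

lemma pvSorted2_pairwise (xs : List (List Int)) :
    (PySem.List.sorted2 xs pvLo pvHb false).Pairwise pvRle := by
  show (List.foldl _ [] xs).Pairwise _
  generalize hacc : ([] : List (List Int)) = acc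
  have hac : acc.Pairwise pvRle := by simp [← hacc]
  clear hacc
  induction xs generalizing acc with
  | nil => simpa using hac
  | cons x xs ih => exact ih _ (pvInsertBy2_pairwise x acc hac)

-- Source B's min fold: the result is a member and a lex lower bound
lemma pvMinFold_spec (rest : List (List Int)) (s : List Int) :
    (rest.foldl (fun m x => if pvListLt2 x m then x else m) s ∈ s :: rest) ∧
    pvRle (rest.foldl (fun m x => if pvListLt2 x m then x else m) s) s ∧
    ∀ x ∈ rest, pvRle (rest.foldl (fun m x => if pvListLt2 x m then x else m) s) x := by
  induction rest generalizing s with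
  | nil =>
    refine ⟨by simp, ?_, by simp⟩
    simp only [List.foldl_nil]
    unfold pvRle; omega
  | cons y rest ih =>
    simp only [List.foldl_cons]
    by_cases hlt : pvListLt2 y s
    · rw [if_pos hlt]
      obtain ⟨hm, hs, hall⟩ := ih y
      have hys : pvRle y s := pvLt2_true hlt
      refine ⟨?_, pvRle_trans hs hys, ?_⟩
      · rcases List.mem_cons.mp hm with h | h
        · simp [h]
        · simp [h]
      · intro x hx
        rcases List.mem_cons.mp hx with rfl | hx
        · exact hs
        · exact hall x hx
    · rw [if_neg hlt]
      obtain ⟨hm, hs, hall⟩ := ih s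
      have hsy : pvRle s y := pvLt2_false (Bool.of_not_eq_true hlt)
      refine ⟨?_, hs, ?_⟩
      · rcases List.mem_cons.mp hm with h | h
        · simp [h]
        · simp [h]
      · intro x hx
        rcases List.mem_cons.mp hx with rfl | hx
        · exact pvRle_trans hs hsy
        · exact hall x hx

-- every clamped span is literally [lo, hb]
lemma pvSpan_shape (intervals : List (List Int)) (hi : Int) (x : List Int)
    (hx : x ∈ (intervals.filter (fun x => decide (x.getD 0 0 ≤ hi) && decide (0 ≤ x.getD 1 0))).map
        (fun x => [max 0 (x.getD 0 0), min hi (x.getD 1 0)])) :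
    x = [pvLo x, pvHb x] := by
  rcases List.mem_map.mp hx with ⟨y, _, rfl⟩
  rfl

-- ---------- A's fold equals a sequential scan (pvScanB) ----------

def pvScanB (reach : Int) : List (List Int) → Option Int
  | [] => none
  | i :: rest =>
    if i.getD 0 0 > reach + 1 then some (reach + 1)
    else pvScanB (if i.getD 1 0 > reach then i.getD 1 0 else reach) rest

lemma pvStepA_cons (h i : List Int) (t : List (List Int)) (ht : t ≠ []) :
    ∃ t'', pvStepA (h :: t) i = h :: t'' ∧ t'' ≠ [] := by
  rcases t with _ | ⟨t0, t1⟩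
  · exact absurd rfl ht
  have hg : (h :: t0 :: t1).getLast? = some ((h :: t0 :: t1).getLast (by simp)) :=
    List.getLast?_eq_some_getLast (by simp)
  unfold pvStepA
  split
  · rename_i heq; rw [hg] at heq; simp at heq
  · rename_i last heq
    split
    · refine ⟨(t0 :: t1).dropLast ++ [last.set 1 (max (last.getD 1 0) (i.getD 1 0))], ?_, by simp⟩
      simp
    · exact ⟨t0 :: (t1 ++ [i]), by simp, by simp⟩

lemma pvStack_stable (l : List (List Int)) : ∀ (h : List Int) (t : List (List Int)), t ≠ [] →
    ∃ t', l.foldl pvStepA (h :: t) = h :: t' ∧ t' ≠ [] := by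
  induction l with
  | nil => exact fun h t ht => ⟨t, rfl, ht⟩
  | cons i l ih =>
    intro h t ht
    obtain ⟨t'', hstep, ht''⟩ := pvStepA_cons h i t ht
    rw [List.foldl_cons, hstep]
    exact ih h t'' ht''

lemma pvLoop_eq (l : List (List Int)) : ∀ (a b : Int),
    (∀ i ∈ l, i.length = 2) →
    (∀ i ∈ l, a ≤ i.getD 0 0) →
    l.Pairwise (fun x y => x.getD 0 0 ≤ y.getD 0 0) →
    (if (l.foldl pvStepA [[a, b]]).length > 1
      then some (((l.foldl pvStepA [[a, b]]).headD []).getD 1 0 + 1) else none)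
      = pvScanB b l := by
  induction l with
  | nil => intro a b _ _ _; simp [pvScanB]
  | cons i l ih =>
    intro a b hlen hge hpw
    have hi2 : i.length = 2 := hlen i (by simp)
    obtain ⟨c, d, rfl⟩ : ∃ c d, i = [c, d] := by
      rcases i with _ | ⟨c, _ | ⟨d, _ | _⟩⟩
      · simp at hi2
      · simp at hi2
      · exact ⟨c, d, rfl⟩
      · simp at hi2
    have hac : a ≤ c := hge [c, d] (by simp)
    rw [List.pairwise_cons] at hpw
    rw [List.foldl_cons]
    have hstep : pvStepA [[a, b]] [c, d] =
        if a - 1 ≤ c ∧ c ≤ b + 1 then [[a, max b d]] else [[a, b], [c, d]] := by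
      simp [pvStepA, List.getD]
    have hscan : pvScanB b ([c, d] :: l) =
        if c > b + 1 then some (b + 1) else pvScanB (if d > b then d else b) l := rfl
    by_cases hcb : c ≤ b + 1
    · have hmax : (if d > b then d else b) = max b d := by
        simp only [max_def]; split <;> split <;> omega
      have hs1 : pvStepA [[a, b]] [c, d] = [[a, max b d]] := by
        rw [hstep, if_pos ⟨by omega, hcb⟩]
      have hsc1 : pvScanB b ([c, d] :: l) = pvScanB (max b d) l := by
        rw [hscan, if_neg (by omega), hmax]
      rw [hs1, hsc1]
      exact ih a (max b d) (fun j hj => hlen j (by simp [hj]))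
        (fun j hj => le_trans hac (hpw.1 j hj)) hpw.2
    · have hs2 : pvStepA [[a, b]] [c, d] = [[a, b], [c, d]] := by
        rw [hstep, if_neg (by omega)]
      have hsc2 : pvScanB b ([c, d] :: l) = some (b + 1) := by
        rw [hscan, if_pos (by omega)]
      obtain ⟨t', ht', htne⟩ := pvStack_stable l [a, b] [[c, d]] (by simp)
      rw [hs2, hsc2, ht']
      rcases t' with _ | _
      · exact absurd rfl htne
      · simp

-- ---------- the scan over a sorted list is characterised by the least fixed point ----------

lemma pvScan_char (l : List (List Int)) : ∀ (b : Int),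
    l.Pairwise (fun x y => pvLo x ≤ pvLo y) →
    ∃ r, pvFixMin l b r ∧
      pvScanB b l = (if l.any (fun x => decide (r + 1 < pvLo x)) then some (r + 1) else none) := by
  induction l with
  | nil =>
    intro b _
    exact ⟨b, ⟨le_refl b, by simp [pvFix], fun r0 h _ => h⟩, by simp [pvScanB]⟩
  | cons x l ih =>
    intro b hpw
    rw [List.pairwise_cons] at hpw
    by_cases hx : pvLo x ≤ b + 1
    · -- x is absorbed; continue with reach max b (hb x)
      obtain ⟨r, ⟨hbr, hfix, hmin⟩, hscan⟩ := ih (max b (pvHb x)) hpw.2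
      have hbr' : b ≤ r := le_trans (le_max_left _ _) hbr
      refine ⟨r, ⟨hbr', ?_, ?_⟩, ?_⟩
      · intro y hy hylo
        rcases List.mem_cons.mp hy with rfl | hy
        · exact le_trans (le_max_right _ _) hbr
        · exact hfix y hy hylo
      · intro r0 hbr0 hfix0
        refine hmin r0 ?_ (fun y hy => hfix0 y (by simp [hy]))
        have hhb : pvHb x ≤ r0 := hfix0 x (by simp) (by omega)
        omega
      · have h1 : pvScanB b (x :: l) = pvScanB (max b (pvHb x)) l := by
          show (if pvLo x > b + 1 then some (b+1) else pvScanB (if pvHb x > b then pvHb x else b) l) = _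
          rw [if_neg (by omega)]
          congr 1
          simp only [max_def]; split <;> split <;> omega
        rw [h1, hscan]
        have h2 : (x :: l).any (fun y => decide (r + 1 < pvLo y)) = l.any (fun y => decide (r + 1 < pvLo y)) := by
          simp only [List.any_cons]
          have : ¬ (r + 1 < pvLo x) := by omega
          simp [this]
        rw [h2]
    · -- x breaks immediately: b itself is the least fixed point
      refine ⟨b, ⟨le_refl b, ?_, fun r0 h _ => h⟩, ?_⟩
      · intro y hy hylo
        rcases List.mem_cons.mp hy with rfl | hy
        · omega
        · exact absurd hylo (by have := hpw.1 y hy; omega)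
      · have hbrk : pvScanB b (x :: l) = some (b + 1) := by
          show (if pvLo x > b + 1 then some (b+1) else _) = _
          rw [if_pos (by omega)]
        rw [hbrk, if_pos]
        simp only [List.any_cons, Bool.or_eq_true, decide_eq_true_iff]
        left; omega

-- ---------- the saturation loop is characterised by the same least fixed point ----------

-- a pass stays below any fixed point
lemma pvPass_le_fix (l : List (List Int)) : ∀ (st : Int × Bool) (r0 : Int), st.1 ≤ r0 →
    pvFix l r0 → (l.foldl pvPassStep st).1 ≤ r0 := by
  induction l with
  | nil => intro st r0 h _; simpa using h
  | cons x l ih =>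
    intro st r0 h hfix
    refine ih (pvPassStep st x) r0 ?_ (fun y hy => hfix y (by simp [hy]))
    unfold pvPassStep
    split
    · rename_i hc
      exact hfix x (by simp) (by unfold pvLo; omega)
    · exact h

-- the changed flag is monotone along a pass
lemma pvPass_flag_mono (l : List (List Int)) : ∀ (r : Int),
    (l.foldl pvPassStep (r, true)).2 = true := by
  induction l with
  | nil => intro r; rfl
  | cons x l ih =>
    intro r
    show (l.foldl pvPassStep (pvPassStep (r, true) x)).2 = true
    unfold pvPassStep
    split
    · exact ih _
    · exact ih r

-- an unchanged pass certifies a fixed point and leaves reach untouched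
lemma pvPass_unchanged (l : List (List Int)) : ∀ (r : Int),
    (l.foldl pvPassStep (r, false)).2 = false →
    (l.foldl pvPassStep (r, false)).1 = r ∧ pvFix l r := by
  induction l with
  | nil => intro r _; exact ⟨rfl, by simp [pvFix]⟩
  | cons x l ih =>
    intro r hflag
    by_cases hc : x.getD 0 0 ≤ r + 1 ∧ r < x.getD 1 0
    · exfalso
      have hstep : pvPassStep (r, false) x = (x.getD 1 0, true) := by
        unfold pvPassStep; rw [if_pos hc]
      rw [List.foldl_cons, hstep, pvPass_flag_mono l _] at hflag
      exact absurd hflag (by simp)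
    · have hstep : pvPassStep (r, false) x = (r, false) := by
        unfold pvPassStep; rw [if_neg hc]
      rw [List.foldl_cons, hstep] at hflag
      obtain ⟨h1, h2⟩ := ih r hflag
      rw [List.foldl_cons, hstep]
      refine ⟨h1, ?_⟩
      intro y hy hylo
      rcases List.mem_cons.mp hy with rfl | hy
      · have hle : y.getD 0 0 ≤ r + 1 := hylo
        exact not_lt.mp (not_and.mp hc hle)
      · exact h2 y hy hylo

-- a changed pass strictly increases reach, to the hb of some member
lemma pvPass_changed (l : List (List Int)) : ∀ (st : Int × Bool),
    ((l.foldl pvPassStep st).1 = st.1 ∧ (l.foldl pvPassStep st).2 = st.2) ∨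
    (st.1 < (l.foldl pvPassStep st).1 ∧ (l.foldl pvPassStep st).2 = true ∧
      ∃ x ∈ l, pvHb x = (l.foldl pvPassStep st).1) := by
  induction l with
  | nil => intro st; exact Or.inl ⟨rfl, rfl⟩
  | cons x l ih =>
    intro st
    rw [List.foldl_cons]
    by_cases hc : x.getD 0 0 ≤ st.1 + 1 ∧ st.1 < x.getD 1 0
    · have hstep : pvPassStep st x = (x.getD 1 0, true) := by unfold pvPassStep; rw [if_pos hc]
      rw [hstep]
      rcases ih (x.getD 1 0, true) with ⟨h1, h2⟩ | ⟨h1, h2, y, hy, hhb⟩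
      · right
        refine ⟨by rw [h1]; exact hc.2, by rw [h2], x, by simp, ?_⟩
        rw [h1]; rfl
      · right
        exact ⟨lt_trans hc.2 h1, h2, y, by simp [hy], hhb⟩
    · have hstep : pvPassStep st x = st := by unfold pvPassStep; rw [if_neg hc]
      rw [hstep]
      rcases ih st with h | ⟨h1, h2, y, hy, hhb⟩
      · exact Or.inl h
      · exact Or.inr ⟨h1, h2, y, by simp [hy], hhb⟩

-- strictly fewer spans reach beyond a strictly larger reach that is some member's hb
lemma pvCount_dec (l : List (List Int)) (r r' : Int) (hrr : r < r')
    (hw : ∃ x ∈ l, pvHb x = r') :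
    (l.filter (fun x => decide (r' < pvHb x))).length < (l.filter (fun x => decide (r < pvHb x))).length := by
  obtain ⟨w, hwmem, hwhb⟩ := hw
  have hsub : List.Sublist (l.filter (fun x => decide (r' < pvHb x))) (l.filter (fun x => decide (r < pvHb x))) := by
    apply List.monotone_filter_right
    intro a ha
    simp only [decide_eq_true_iff] at ha ⊢
    omega
  refine Nat.lt_of_le_of_ne hsub.length_le ?_
  intro heq
  have heql := hsub.eq_of_length heq
  have hwin : w ∈ l.filter (fun x => decide (r < pvHb x)) :=
    List.mem_filter.mpr ⟨hwmem, by simp; omega⟩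
  rw [← heql] at hwin
  have := (List.mem_filter.mp hwin).2
  simp at this; omega

-- with enough fuel the saturation reaches a fixed point at or above the seed
lemma pvSat_fix (fuel : Nat) : ∀ (l : List (List Int)) (r : Int),
    (l.filter (fun x => decide (r < pvHb x))).length < fuel →
    r ≤ pvSat l fuel r ∧ pvFix l (pvSat l fuel r) := by
  induction fuel with
  | zero => intro l r h; omega
  | succ fuel ih =>
    intro l r h
    rw [show pvSat l (fuel + 1) r
        = (if (l.foldl pvPassStep (r, false)).2 then pvSat l fuel (l.foldl pvPassStep (r, false)).1 else r) from rfl]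
    by_cases hflag : (l.foldl pvPassStep (r, false)).2 = true
    · rw [if_pos hflag]
      rcases pvPass_changed l (r, false) with ⟨_, h2⟩ | ⟨h1, _, hw⟩
      · rw [hflag] at h2; exact absurd h2.symm (by simp)
      · have hcnt := pvCount_dec l r _ h1 hw
        have hih := ih l (l.foldl pvPassStep (r, false)).1 (by omega)
        exact ⟨le_trans (le_of_lt h1) hih.1, hih.2⟩
    · rw [if_neg hflag]
      have hf : (l.foldl pvPassStep (r, false)).2 = false := by simpa using hflag
      exact ⟨le_refl r, (pvPass_unchanged l r hf).2⟩

-- the saturation never exceeds a fixed point above the seed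
lemma pvSat_min (fuel : Nat) : ∀ (l : List (List Int)) (r r0 : Int), r ≤ r0 → pvFix l r0 →
    pvSat l fuel r ≤ r0 := by
  induction fuel with
  | zero => intro l r r0 h _; exact h
  | succ fuel ih =>
    intro l r r0 h hfix
    rw [show pvSat l (fuel + 1) r
        = (if (l.foldl pvPassStep (r, false)).2 then pvSat l fuel (l.foldl pvPassStep (r, false)).1 else r) from rfl]
    split
    · exact ih l _ r0 (pvPass_le_fix l (r, false) r0 h hfix) hfix
    · exact h

-- least fixed points are unique and transfer along permutations (membership only)
lemma pvFixMin_unique {l l' : List (List Int)} {b r r' : Int}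
    (hperm : ∀ x, x ∈ l ↔ x ∈ l')
    (h1 : pvFixMin l b r) (h2 : pvFixMin l' b r') : r = r' := by
  obtain ⟨hb1, hf1, hm1⟩ := h1
  obtain ⟨hb2, hf2, hm2⟩ := h2
  have hf1' : pvFix l' r := fun x hx => hf1 x ((hperm x).mpr hx)
  have hf2' : pvFix l r' := fun x hx => hf2 x ((hperm x).mp hx)
  exact le_antisymm (hm1 r' hb2 hf2') (hm2 r hb1 hf1')

-- ===== VERDICT (by name: the statement is the Claim_ definition above) =====
theorem find_missing_spec : Claim_equal_find_missing := by
  intro intervals hi _ hpre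
  unfold Spec_find_missing find_missing find_missing_alt
  set spans := (intervals.filter (fun x => decide (x.getD 0 0 ≤ hi) && decide (0 ≤ x.getD 1 0))).map
      (fun x => [max 0 (x.getD 0 0), min hi (x.getD 1 0)]) with hspans
  set L := PySem.List.sorted2 spans (fun x => x.getD 0 0) (fun x => x.getD 1 0) with hL
  -- spans is nonempty (Pre_ guarantees a surviving interval)
  obtain ⟨x0, hx0mem, hx0a, hx0b⟩ := hpre.2
  have hspne : spans ≠ [] := by
    intro hnil
    have hmem : [max 0 (x0.getD 0 0), min hi (x0.getD 1 0)] ∈ spans := by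
      rw [hspans]
      exact List.mem_map.mpr ⟨x0, List.mem_filter.mpr ⟨hx0mem,
        by simp only [Bool.and_eq_true, decide_eq_true_iff]; exact ⟨hx0a, hx0b⟩⟩, rfl⟩
    rw [hnil] at hmem
    simp at hmem
  have hperm : L.Perm spans := hL ▸ PySem.List.sorted2_perm _ _ _ _
  have hshape : ∀ x ∈ spans, x = [pvLo x, pvHb x] := fun x hx => pvSpan_shape intervals hi x (hspans ▸ hx)
  have hpwL : L.Pairwise pvRle := hL ▸ pvSorted2_pairwise spans
  rcases hLc : L with _ | ⟨s0, srest⟩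
  · rw [hLc] at hperm
    exact absurd (List.Perm.eq_nil hperm.symm) hspne
  rw [hLc] at hperm hpwL
  rw [List.pairwise_cons] at hpwL
  have hs0mem : s0 ∈ spans := hperm.mem_iff.mp (by simp)
  -- destructure spans for B's min
  rcases hspc : spans with _ | ⟨sp0, sptl⟩
  · exact absurd hspc hspne
  rw [hspc] at hperm hshape hs0mem
  obtain ⟨hmmem, hms, hmall⟩ := pvMinFold_spec sptl sp0
  set m := sptl.foldl (fun m x => if pvListLt2 x m then x else m) sp0 with hm
  -- the minimum equals the sorted head
  have hmL : m ∈ s0 :: srest := hperm.symm.mem_iff.mp hmmem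
  have hs0m : pvRle s0 m := by
    rcases List.mem_cons.mp hmL with h | h
    · rw [h]; unfold pvRle; omega
    · exact hpwL.1 m h
  have hms0 : pvRle m s0 := by
    rcases List.mem_cons.mp hs0mem with h | h
    · rw [← h] at hms; exact hms
    · exact hmall s0 h
  have hkey : pvLo s0 = pvLo m ∧ pvHb s0 = pvHb m := by unfold pvRle at hs0m hms0; omega
  have hmeq : m = s0 := by
    rw [hshape m hmmem, hshape s0 hs0mem, hkey.1, hkey.2]
  -- B's remove and the permutation with the sorted tail
  have hrem : PySem.List.remove? (sp0 :: sptl) m = some ((sp0 :: sptl).erase m) :=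
    PySem.List.remove?_eq_some_erase (sp0 :: sptl) m hmmem
  have hpermrest : srest.Perm ((sp0 :: sptl).erase m) := by
    have h1 : (sp0 :: sptl).Perm (m :: (sp0 :: sptl).erase m) := List.perm_cons_erase hmmem
    have h2 := hperm.trans h1
    rw [hmeq] at h2
    rw [hmeq]
    exact h2.cons_inv
  set rest := (sp0 :: sptl).erase m with hrest
  -- A's side reduces to the scan over the sorted tail
  have hlen2 : ∀ i ∈ srest, i.length = 2 := by
    intro i hin
    have := hshape i (hperm.mem_iff.mp (by simp [hin]))
    rw [this]; rfl
  obtain ⟨a, b, hs0ab⟩ : ∃ a b, s0 = [a, b] := ⟨pvLo s0, pvHb s0, hshape s0 hs0mem⟩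
  have hA : (if (srest.foldl pvStepA [s0]).length > 1
      then some (((srest.foldl pvStepA [s0]).headD []).getD 1 0 + 1) else none)
      = pvScanB b srest := by
    rw [hs0ab]
    refine pvLoop_eq srest a b hlen2 ?_ (hpwL.2.imp (fun h => by unfold pvRle pvLo at h; omega))
    intro i hin
    have := hpwL.1 i hin
    unfold pvRle pvLo at this
    rw [hs0ab] at this
    rcases this with h | h
    · exact le_of_lt (by simpa [List.getD] using h)
    · exact le_of_eq (by simpa [List.getD] using h.1)
  -- the scan's least-fixed-point characterisation
  obtain ⟨r, hrmin, hscan⟩ := pvScan_char srest b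
    (hpwL.2.imp (fun h => by unfold pvRle at h; omega))
  -- the saturation computes the same least fixed point
  set R := pvSat rest (rest.length + 1) (m.getD 1 0) with hR
  have hseed : m.getD 1 0 = b := by
    have hb1 : pvHb s0 = b := by rw [hs0ab]; rfl
    show pvHb m = b
    rw [← hkey.2, hb1]
  have hsatfix := pvSat_fix (rest.length + 1) rest (m.getD 1 0)
    (Nat.lt_succ_of_le (List.length_filter_le _ _))
  have hRmin : pvFixMin rest (m.getD 1 0) R :=
    ⟨hsatfix.1, hsatfix.2, fun r0 h1 h2 => pvSat_min (rest.length + 1) rest _ r0 h1 h2⟩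
  rw [hseed] at hRmin
  have hrR : r = R := pvFixMin_unique (fun x => hpermrest.mem_iff) hrmin hRmin
  -- assemble
  show (match s0 :: srest with
    | [] => none
    | first :: rest' =>
      let stack := rest'.foldl pvStepA [first]
      if stack.length > 1 then some ((stack.headD []).getD 1 0 + 1) else none)
    = _
  simp only
  rw [hA, hscan]
  show _ = (match pvMinSpan (sp0 :: sptl) with
    | none => none
    | some seed =>
      match PySem.List.remove? (sp0 :: sptl) seed with
      | none => none
      | some rest' =>
        let r' := pvSat rest' (rest'.length + 1) (seed.getD 1 0)
        if rest'.any (fun x => decide (r' + 1 < x.getD 0 0)) then some (r' + 1) else none)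
  show _ = (match PySem.List.remove? (sp0 :: sptl) m with
    | none => none
    | some rest' =>
      let r' := pvSat rest' (rest'.length + 1) (m.getD 1 0)
      if rest'.any (fun x => decide (r' + 1 < x.getD 0 0)) then some (r' + 1) else none)
  rw [hrem]
  simp only
  rw [← hR, hrR]
  -- the final existence tests agree across the permutation (membership only)
  have hany : srest.any (fun x => decide (R + 1 < pvLo x))
      = rest.any (fun x => decide (R + 1 < x.getD 0 0)) := hpermrest.any_eq
  rw [hany]
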